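-- pv_equiv track=rewrite | github.com/shancock-va/for-fun | coding-interview-examples/company-v/piles_of_books.py | split_unstable_piles
-- ===== SOURCE A (Python) =====
-- def split_pile(original_pile_height, number_of_partitions):
--     '''
--     Splits a pile into a number_of_partitions piles and evenly fills them
--     '''
--     new_piles = []
--     for partition_number in range(0, number_of_partitions):
--         new_pile_size = original_pile_height // number_of_partitions
--         if original_pile_height % number_of_partitions > partition_number:
--             new_pile_size += 1
--         new_piles.append(new_pile_size)
--     return new_piles
--
-- def split_unstable_piles(piles, stable_height, number_of_partitions):
--     '''
--     Split any unstable piles (piles > stable_height) into number_of_partitions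
--     '''
--     split_piles = []
--     for pile in piles:
--         if pile > stable_height:
--             new_piles = split_pile(pile, number_of_partitions)
--             split_piles += split_unstable_piles(new_piles, stable_height, number_of_partitions)
--         else:
--             split_piles += [pile]
--     return split_piles
-- ===== SOURCE B (Python) =====
-- def split_pile(original_pile_height, number_of_partitions):
--     '''Closed-form split: one divmod, then r piles of q+1 followed by n-r piles of q.'''
--     if number_of_partitions <= 0:
--         return []
--     q, r = divmod(original_pile_height, number_of_partitions)
--     return [q + 1] * r + [q] * (number_of_partitions - r)
--
-- def split_unstable_piles(piles, stable_height, number_of_partitions):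
--     '''Iterative worklist: an explicit LIFO stack replaces all recursion.'''
--     out = []
--     stack = list(reversed(piles))
--     while stack:
--         pile = stack.pop()
--         if pile <= stable_height:
--             out.append(pile)
--         else:
--             # push the parts in reverse so they are emitted left-to-right
--             stack.extend(reversed(split_pile(pile, number_of_partitions)))
--     return out
-- ===== Notes on version B (the rewrite author's own statement) =====
-- stated objective: alternative
-- what changed: The recursive list-rebuilding of A is replaced by a non-recursive worklist loop over an explicit LIFO stack, and split_pile's per-index loop by one divmod plus two list-repetitions.
import Mathlib
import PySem

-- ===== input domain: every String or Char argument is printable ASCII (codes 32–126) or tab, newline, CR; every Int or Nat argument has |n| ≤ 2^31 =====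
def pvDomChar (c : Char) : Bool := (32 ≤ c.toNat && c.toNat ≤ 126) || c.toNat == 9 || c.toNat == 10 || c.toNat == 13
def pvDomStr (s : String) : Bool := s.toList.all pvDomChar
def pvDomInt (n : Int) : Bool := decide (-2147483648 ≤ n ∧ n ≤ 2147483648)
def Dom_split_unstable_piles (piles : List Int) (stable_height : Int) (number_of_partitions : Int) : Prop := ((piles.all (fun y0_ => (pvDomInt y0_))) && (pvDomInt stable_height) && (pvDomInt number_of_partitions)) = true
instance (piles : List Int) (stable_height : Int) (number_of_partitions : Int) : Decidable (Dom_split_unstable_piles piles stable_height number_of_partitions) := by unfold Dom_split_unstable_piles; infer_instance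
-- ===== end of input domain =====

-- B replaces A's recursion by a non-recursive worklist loop over an explicit LIFO stack, and
-- split_pile's per-index loop by one divmod plus two list repetitions (objective: alternative).
-- Both ports are guarded by fuel; on every input admitted by Pre_ (exactly where the Python A
-- terminates) the fuel is sufficient, as the proofs below establish.

-- ===== PORT A =====
-- fuel for A: a bound on A's recursion depth (the pile values shrink by ≥ 1 per level)
def pvFuel (piles : List Int) : Nat := (piles.map Int.toNat).sum + 2

def split_pile_py (original_pile_height number_of_partitions : Int) : List Int :=
  (PySem.List.pyRange 0 number_of_partitions 1).foldl
    (fun new_piles partition_number =>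
      let new_pile_size := PySem.Int.floordiv original_pile_height number_of_partitions
      let new_pile_size :=
        if PySem.Int.mod original_pile_height number_of_partitions > partition_number
        then new_pile_size + 1 else new_pile_size
      new_piles ++ [new_pile_size]) []

def splitLoopA (stable_height number_of_partitions : Int) : Nat → List Int → List Int
  | 0, _ => []
  | f+1, piles => piles.foldl
      (fun split_piles pile =>
        if pile > stable_height then
          split_piles ++ splitLoopA stable_height number_of_partitions f
            (split_pile_py pile number_of_partitions)
        else split_piles ++ [pile]) []

def split_unstable_piles (piles : List Int) (stable_height : Int) (number_of_partitions : Int) : List Int :=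
  splitLoopA stable_height number_of_partitions (pvFuel piles) piles

-- ===== PORT B =====
def split_pile_alt (original_pile_height number_of_partitions : Int) : List Int :=
  if number_of_partitions ≤ 0 then []
  else
    let q := PySem.Int.floordiv original_pile_height number_of_partitions
    let r := PySem.Int.mod original_pile_height number_of_partitions
    List.replicate r.toNat (q + 1) ++ List.replicate (number_of_partitions - r).toNat q

-- fuel for B: a bound on the total number of loop iterations (pops)
def pvFuelB (piles : List Int) (n : Int) : Nat :=
  (piles.map (fun p => (n.toNat + 2) ^ (p.toNat + 1))).sum + 1

-- the Python stack pops from its END; here the stack list is kept top-first, so Python's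
-- 'stack.extend(reversed(parts)); ... pop()' is exactly 'parts ++ rest' with head = next pop
def loopB (s n : Int) : Nat → List Int → List Int → List Int
  | 0, _, out => out
  | _+1, [], out => out
  | f+1, pile :: rest, out =>
      if pile ≤ s then loopB s n f rest (out ++ [pile])
      else loopB s n f (split_pile_alt pile n ++ rest) out

def split_unstable_piles_alt (piles : List Int) (stable_height : Int) (number_of_partitions : Int) : List Int :=
  loopB stable_height number_of_partitions (pvFuelB piles number_of_partitions) piles []

-- ===== PRECONDITION & SPEC =====
-- Pre_ = exactly the inputs on which the Python A returns: outside it (some pile unstable while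
-- number_of_partitions = 1, or number_of_partitions ≥ 2 with stable_height ≤ 0) the recursion
-- never bottoms out and A raises RecursionError.
def Pre_split_unstable_piles (piles : List Int) (stable_height : Int) (number_of_partitions : Int) : Prop :=
  (∀ p ∈ piles, p ≤ stable_height) ∨ number_of_partitions ≤ 0 ∨
    (1 ≤ stable_height ∧ 2 ≤ number_of_partitions)
instance (piles : List Int) (stable_height : Int) (number_of_partitions : Int) : Decidable (Pre_split_unstable_piles piles stable_height number_of_partitions) := by unfold Pre_split_unstable_piles; infer_instance

def pvWitness_split_unstable_piles : List Int × Int × Int := ([5, 1, 9], 2, 2)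

def Spec_split_unstable_piles (piles : List Int) (stable_height : Int) (number_of_partitions : Int) (out : List Int) : Prop := out = split_unstable_piles_alt piles stable_height number_of_partitions
instance (piles : List Int) (stable_height : Int) (number_of_partitions : Int) (out : List Int) : Decidable (Spec_split_unstable_piles piles stable_height number_of_partitions out) := by unfold Spec_split_unstable_piles; infer_instance

-- ===== CLAIM =====
def Claim_equal_split_unstable_piles : Prop := ∀ (piles : List Int) (stable_height : Int) (number_of_partitions : Int), Dom_split_unstable_piles piles stable_height number_of_partitions → Pre_split_unstable_piles piles stable_height number_of_partitions → Spec_split_unstable_piles piles stable_height number_of_partitions (split_unstable_piles piles stable_height number_of_partitions)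

-- ===== LEMMAS AND PROOFS =====

-- F: the common 'leaves of one pile' function both proofs are reduced to (depth-fueled)
def F (s n : Int) : Nat → Int → List Int
  | 0, _ => []
  | f+1, p => if p ≤ s then [p] else (split_pile_alt p n).flatMap (F s n f)

-- A's index loop produces the same partition sizes as B's closed form.
lemma split_pile_eq (h n : Int) : split_pile_py h n = split_pile_alt h n := by
  unfold split_pile_py split_pile_alt
  by_cases hn : n ≤ 0
  · simp [PySem.List.pyRange_one_eq_nil hn, hn]
  · replace hn : 0 < n := by omega
    rw [PySem.List.foldl_append_singleton_eq_map]
    have hr0 : 0 ≤ PySem.Int.mod h n := PySem.Int.mod_nonneg h hn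
    have hrn : PySem.Int.mod h n < n := PySem.Int.mod_lt h hn
    set q := PySem.Int.floordiv h n
    set r := PySem.Int.mod h n
    rw [PySem.List.pyRange_one_append 0 r n hr0 (le_of_lt hrn)]
    simp only [List.map_append, if_neg (by omega : ¬ n ≤ 0), List.nil_append]
    congr 1
    · rw [List.eq_replicate_iff]
      constructor
      · simp [PySem.List.length_pyRange_one]
      · intro b hb
        simp only [List.mem_map] at hb
        obtain ⟨k, hk, rfl⟩ := hb
        rw [PySem.List.mem_pyRange_one] at hk
        simp [if_pos (by omega : r > k)]
    · rw [List.eq_replicate_iff]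
      constructor
      · simp [PySem.List.length_pyRange_one]
      · intro b hb
        simp only [List.mem_map] at hb
        obtain ⟨k, hk, rfl⟩ := hb
        rw [PySem.List.mem_pyRange_one] at hk
        simp [if_neg (by omega : ¬ r > k)]

-- With equal fuel, A's whole-list recursion is the per-pile F, flat-mapped.
lemma loopA_eq_flatten (s n : Int) :
    ∀ (f : Nat) (piles : List Int),
      splitLoopA s n f piles = piles.flatMap (F s n f) := by
  intro f
  induction f with
  | zero => intro piles; simp [splitLoopA, F]
  | succ f ih =>
      intro piles
      show piles.foldl
        (fun acc pile =>
          if pile > s then acc ++ splitLoopA s n f (split_pile_py pile n)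
          else acc ++ [pile]) [] = _
      have hbody : (fun (acc : List Int) pile =>
          if pile > s then acc ++ splitLoopA s n f (split_pile_py pile n)
          else acc ++ [pile]) =
          fun acc pile => acc ++
            (if pile > s then splitLoopA s n f (split_pile_py pile n) else [pile]) := by
        funext acc pile; split <;> rfl
      rw [hbody, PySem.List.foldl_append_eq_flatMap, List.nil_append]
      congr 1
      funext pile
      by_cases hp : pile ≤ s
      · simp [F, hp, if_neg (by omega : ¬ pile > s)]
      · simp only [if_pos (by omega : pile > s), ih, split_pile_eq]
        simp [F, hp]

-- every part of an unstable pile is nonnegative and strictly smaller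
lemma mem_split_bound {p n x : Int} (hn : 2 ≤ n) (hp : 2 ≤ p)
    (hx : x ∈ split_pile_alt p n) : 0 ≤ x ∧ x.toNat < p.toNat := by
  unfold split_pile_alt at hx
  rw [if_neg (by omega : ¬ n ≤ 0)] at hx
  have hq := PySem.Int.floordiv_mul_add_mod p n
  have hr0 : 0 ≤ PySem.Int.mod p n := PySem.Int.mod_nonneg p (by omega)
  have hrn : PySem.Int.mod p n < n := PySem.Int.mod_lt p (by omega)
  set q := PySem.Int.floordiv p n with hqdef
  set r := PySem.Int.mod p n with hrdef
  simp only [List.mem_append, List.mem_replicate] at hx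
  rcases hx with ⟨hne, rfl⟩ | ⟨-, rfl⟩
  · have hr1 : 1 ≤ r := by
      rcases lt_or_ge 0 r with h | h
      · omega
      · exfalso; apply hne; omega
    constructor
    · nlinarith
    · have h1 : 0 ≤ q := by nlinarith
      have h2 : q + 1 < p := by nlinarith
      omega
  · have h1 : 0 ≤ q := by nlinarith
    have h2 : q < p := by nlinarith
    exact ⟨h1, by omega⟩

lemma flatMap_congr_mem {α β : Type} {l : List α} {f g : α → List β}
    (h : ∀ x ∈ l, f x = g x) : l.flatMap f = l.flatMap g := by
  induction l with
  | nil => rfl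
  | cons a t ih =>
      simp only [List.flatMap_cons, h a (List.mem_cons_self), ih (fun x hx => h x (List.mem_cons_of_mem a hx))]

-- in the terminating case, F is fuel-irrelevant once the fuel exceeds the pile value
lemma F_fuel_irrel {s n : Int} (hs : 1 ≤ s) (hn : 2 ≤ n) :
    ∀ (m : Nat) (p : Int), p.toNat ≤ m →
      ∀ k₁ k₂, p.toNat < k₁ → p.toNat < k₂ → F s n k₁ p = F s n k₂ p := by
  intro m
  induction m with
  | zero =>
      intro p hp k₁ k₂ h1 h2
      obtain ⟨a, rfl⟩ : ∃ a, k₁ = a + 1 := ⟨k₁ - 1, by omega⟩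
      obtain ⟨b, rfl⟩ : ∃ b, k₂ = b + 1 := ⟨k₂ - 1, by omega⟩
      have : p ≤ s := by omega
      simp [F, this]
  | succ m ih =>
      intro p hp k₁ k₂ h1 h2
      obtain ⟨a, rfl⟩ : ∃ a, k₁ = a + 1 := ⟨k₁ - 1, by omega⟩
      obtain ⟨b, rfl⟩ : ∃ b, k₂ = b + 1 := ⟨k₂ - 1, by omega⟩
      by_cases hps : p ≤ s
      · simp [F, hps]
      · have hp2 : 2 ≤ p := by omega
        simp only [F, if_neg hps]
        apply flatMap_congr_mem
        intro x hx
        obtain ⟨hx0, hxlt⟩ := mem_split_bound hn hp2 hx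
        exact ih x (by omega) a b (by omega) (by omega)

-- the potential of a stack: an upper bound (plus one per element) on the pops it causes
def potential (n : Int) (stack : List Int) : Nat :=
  (stack.map (fun p => (n.toNat + 2) ^ (p.toNat + 1))).sum

lemma loopB_drain_stable {s n : Int} :
    ∀ (f : Nat) (stack out : List Int), (∀ p ∈ stack, p ≤ s) → stack.length < f →
      loopB s n f stack out = out ++ stack := by
  intro f
  induction f with
  | zero => intro stack out _ h; omega
  | succ f ih =>
      intro stack out hst hlen
      cases stack with
      | nil => simp [loopB]
      | cons pile rest =>
          have hp : pile ≤ s := hst pile List.mem_cons_self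
          simp only [loopB, if_pos hp]
          rw [ih rest (out ++ [pile]) (fun p hp => hst p (List.mem_cons_of_mem _ hp)) (by simp at hlen ⊢; omega)]
          simp

lemma loopB_nonpos {s n : Int} (hn : n ≤ 0) :
    ∀ (f : Nat) (stack out : List Int), stack.length < f →
      loopB s n f stack out = out ++ stack.flatMap (fun p => if p ≤ s then [p] else []) := by
  intro f
  induction f with
  | zero => intro stack out h; omega
  | succ f ih =>
      intro stack out hlen
      cases stack with
      | nil => simp [loopB]
      | cons pile rest =>
          by_cases hp : pile ≤ s
          · simp only [loopB, if_pos hp]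
            rw [ih rest (out ++ [pile]) (by simp at hlen ⊢; omega)]
            simp [hp]
          · simp only [loopB, if_neg hp]
            rw [show split_pile_alt pile n = [] by simp [split_pile_alt, hn]]
            rw [List.nil_append, ih rest out (by simp at hlen ⊢; omega)]
            simp [hp]

lemma loopB_main {s n : Int} (hs : 1 ≤ s) (hn : 2 ≤ n) :
    ∀ (f : Nat) (stack out : List Int), potential n stack < f →
      loopB s n f stack out = out ++ stack.flatMap (fun p => F s n (p.toNat + 1) p) := by
  intro f
  induction f with
  | zero => intro stack out h; omega
  | succ f ih =>
      intro stack out hpot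
      cases stack with
      | nil => simp [loopB]
      | cons pile rest =>
          have hΦ1 : (1:Nat) ≤ (n.toNat + 2) ^ (pile.toNat + 1) := Nat.one_le_pow _ _ (by omega)
          have hcons : potential n (pile :: rest) = (n.toNat + 2) ^ (pile.toNat + 1) + potential n rest := by
            simp [potential]
          by_cases hp : pile ≤ s
          · simp only [loopB, if_pos hp]
            rw [ih rest (out ++ [pile]) (by omega)]
            simp [F, hp]
          · -- splitting step: the potential strictly drops
            have hp2 : 2 ≤ pile := by omega
            have hparts_le : ∀ x ∈ (split_pile_alt pile n).map (fun p => (n.toNat + 2) ^ (p.toNat + 1)),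
                x ≤ (n.toNat + 2) ^ pile.toNat := by
              intro x hx
              simp only [List.mem_map] at hx
              obtain ⟨y, hy, rfl⟩ := hx
              obtain ⟨-, hlt⟩ := mem_split_bound hn hp2 hy
              exact Nat.pow_le_pow_right (by omega) (by omega)
            have hlenparts : (split_pile_alt pile n).length ≤ n.toNat := by
              unfold split_pile_alt
              rw [if_neg (by omega : ¬ n ≤ 0)]
              have hr0 : 0 ≤ PySem.Int.mod pile n := PySem.Int.mod_nonneg pile (by omega)
              have hrn : PySem.Int.mod pile n < n := PySem.Int.mod_lt pile (by omega)
              simp only [List.length_append, List.length_replicate]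
              omega
            have hpotparts : potential n (split_pile_alt pile n) ≤ n.toNat * (n.toNat + 2) ^ pile.toNat := by
              calc potential n (split_pile_alt pile n)
                  ≤ ((split_pile_alt pile n).map (fun p => (n.toNat + 2) ^ (p.toNat + 1))).length •
                      (n.toNat + 2) ^ pile.toNat := List.sum_le_card_nsmul _ _ hparts_le
                _ ≤ n.toNat * (n.toNat + 2) ^ pile.toNat := by
                    simp only [List.length_map, smul_eq_mul]
                    exact Nat.mul_le_mul_right _ hlenparts
            have hdrop : potential n (split_pile_alt pile n) + 1 < (n.toNat + 2) ^ (pile.toNat + 1) := by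
              have hexp : (n.toNat + 2) ^ (pile.toNat + 1) =
                  n.toNat * (n.toNat + 2) ^ pile.toNat + 2 * (n.toNat + 2) ^ pile.toNat := by
                rw [pow_succ]; ring
              have h1 : (1:Nat) ≤ (n.toNat + 2) ^ pile.toNat := Nat.one_le_pow _ _ (by omega)
              omega
            have happ : potential n (split_pile_alt pile n ++ rest) =
                potential n (split_pile_alt pile n) + potential n rest := by
              simp [potential]
            simp only [loopB, if_neg hp]
            rw [ih (split_pile_alt pile n ++ rest) out (by omega)]
            rw [List.flatMap_cons, List.flatMap_append]
            congr 2
            show (split_pile_alt pile n).flatMap (fun p => F s n (p.toNat + 1) p) = F s n (pile.toNat + 1) pile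
            have : F s n (pile.toNat + 1) pile = (split_pile_alt pile n).flatMap (F s n pile.toNat) := by
              simp [F, hp]
            rw [this]
            apply flatMap_congr_mem
            intro x hx
            obtain ⟨hx0, hxlt⟩ := mem_split_bound hn hp2 hx
            exact F_fuel_irrel hs hn x.toNat x le_rfl (x.toNat + 1) pile.toNat (by omega) (by omega)

lemma one_le_each_sum {l : List Int} {n : Int} :
    l.length ≤ (l.map (fun p => (n.toNat + 2) ^ (p.toNat + 1))).sum := by
  induction l with
  | nil => simp
  | cons a t ih =>
      have : (1:Nat) ≤ (n.toNat + 2) ^ (a.toNat + 1) := Nat.one_le_pow _ _ (by omega)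
      simp only [List.map_cons, List.sum_cons, List.length_cons]
      omega

lemma mem_le_sum_toNat {l : List Int} {p : Int} (hp : p ∈ l) :
    p.toNat ≤ (l.map Int.toNat).sum := by
  induction l with
  | nil => cases hp
  | cons a t ih =>
      rcases List.mem_cons.mp hp with rfl | h
      · simp
      · have := ih h
        simp only [List.map_cons, List.sum_cons]; omega

-- ===== VERDICT =====
theorem split_unstable_piles_spec : Claim_equal_split_unstable_piles := by
  intro piles s n _ hpre
  unfold Spec_split_unstable_piles split_unstable_piles split_unstable_piles_alt
  rw [loopA_eq_flatten]
  rcases hpre with hall | hn | ⟨hs, hn⟩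
  · -- all piles already stable
    rw [loopB_drain_stable _ _ _ hall (lt_of_le_of_lt (one_le_each_sum (n := n)) (by unfold pvFuelB; omega)), List.nil_append]
    have : ∀ p ∈ piles, F s n (pvFuel piles) p = [p] := by
      intro p hp
      show F s n ((piles.map Int.toNat).sum + 1 + 1) p = [p]
      simp [F, hall p hp]
    rw [flatMap_congr_mem this]
    exact List.flatMap_singleton' piles
  · -- no partitions: unstable piles vanish on both sides
    rw [loopB_nonpos hn _ _ _ (lt_of_le_of_lt (one_le_each_sum (n := n)) (by unfold pvFuelB; omega)), List.nil_append]
    apply flatMap_congr_mem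
    intro p _
    show F s n ((piles.map Int.toNat).sum + 1 + 1) p = _
    by_cases hp : p ≤ s
    · simp [F, hp]
    · simp only [F, if_neg hp]
      rw [show split_pile_alt p n = [] by simp [split_pile_alt, hn]]
      simp
  · -- main case
    rw [loopB_main hs hn _ _ _ (by unfold pvFuelB potential; omega), List.nil_append]
    apply flatMap_congr_mem
    intro p hp
    have hmem : p.toNat ≤ (piles.map Int.toNat).sum := mem_le_sum_toNat hp
    exact F_fuel_irrel hs hn p.toNat p le_rfl (pvFuel piles) (p.toNat + 1)
      (by unfold pvFuel; omega) (by omega)
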